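-- pv_equiv track=rewrite | github.com/nazirite96/pythonStudy | most_close_letter.py | solution
-- ===== SOURCE A (Python) =====
-- def solution(s):
--     answer = []
--     s_list = []
--     for i,s_letter in enumerate(s):
--         if s_letter in s_list:
--             answer.append(i-s_list.index(s_letter))
--             s_list[s_list.index(s_letter)] = 'checked'
--         else:
--             answer.append(-1)
--         s_list.append(s_letter)
--
--     return answer
-- ===== SOURCE B (Python) =====
-- def solution(s):
--     # Two staged passes: group every letter's occurrence positions into one
--     # dict of position lists, then scatter the gaps between consecutive
--     # positions of each letter into a preallocated answer array (the matched
--     # prior occurrence is always the previous occurrence of the same letter).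
--     positions = {}
--     for i, c in enumerate(s):
--         positions.setdefault(c, []).append(i)
--     answer = [-1] * len(s)
--     for ps in positions.values():
--         for p, q in zip(ps, ps[1:]):
--             answer[q] = q - p
--     return answer
-- ===== Notes on version B (the rewrite author's own statement) =====
-- stated objective: faster
-- what changed: Replaced the single-pass scan-and-mark seen-letters list (a linear membership/.index scan per character plus 'checked' overwrites) by two staged passes: first group every letter's occurrence positions into a dict of position lists, then scatter the gaps between consecutive positions of each letter into a preallocated answer array (the matched prior occurrence is provably always the previous occurrence of the same letter).
import Mathlib
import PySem

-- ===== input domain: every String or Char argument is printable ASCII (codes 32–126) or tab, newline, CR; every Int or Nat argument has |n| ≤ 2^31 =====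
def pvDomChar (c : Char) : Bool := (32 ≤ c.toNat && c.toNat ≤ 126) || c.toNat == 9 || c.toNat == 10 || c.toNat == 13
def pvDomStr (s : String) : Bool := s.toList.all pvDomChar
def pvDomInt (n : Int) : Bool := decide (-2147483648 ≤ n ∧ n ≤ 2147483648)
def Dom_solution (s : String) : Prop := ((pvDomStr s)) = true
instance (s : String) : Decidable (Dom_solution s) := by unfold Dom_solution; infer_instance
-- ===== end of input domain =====

-- B replaces A's one-pass scan-and-mark seen-letters list (a linear .index scan per
-- character) by two staged passes: group each letter's occurrence positions into a
-- dict of lists, then scatter the gaps between consecutive positions into a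
-- preallocated answer array; return values are proved equal.

-- ===== PORT A =====
-- A's loop: s_list holds the seen letters (1-char strings), matched ones overwritten
-- by "checked"; the 'in' test + .index are one index? lookup (some = member, first index).
def solutionLoopA : Nat → List Char → List Int → List String → List Int
  | _, [], ans, _ => ans
  | i, c :: rest, ans, sl =>
      match PySem.List.index? sl (String.singleton c) with
      | some idx =>
          solutionLoopA (i + 1) rest (ans ++ [(i : Int) - (idx : Int)])
            ((sl.set idx "checked") ++ [String.singleton c])
      | none =>
          solutionLoopA (i + 1) rest (ans ++ [-1]) (sl ++ [String.singleton c])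

def solution (s : String) : List Int := solutionLoopA 0 s.toList [] []

-- ===== PORT B =====
-- first pass: positions.setdefault(c, []).append(i)  =  modify c [] (· ++ [i])
def buildPos : Nat → List Char → PySem.Dict Char (List Nat) → PySem.Dict Char (List Nat)
  | _, [], d => d
  | i, c :: rest, d => buildPos (i + 1) rest (d.modify c [] (fun l => l ++ [i]))

-- second pass, one letter: for p, q in zip(ps, ps[1:]): answer[q] = q - p
-- (q is a valid index into answer, so List.set is exact for the assignment)
def scatterOne (a : List Int) (ps : List Nat) : List Int :=
  (ps.zip (PySem.List.slice ps (some 1) none)).foldl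
    (fun a pq => a.set pq.2 ((pq.2 : Int) - (pq.1 : Int))) a

def solution_alt (s : String) : List Int :=
  let cs := s.toList
  let positions := buildPos 0 cs PySem.Dict.empty
  positions.values.foldl scatterOne (List.replicate cs.length (-1))

-- ===== PRECONDITION & SPEC =====
def Spec_solution (s : String) (out : List Int) : Prop := out = solution_alt s
instance (s : String) (out : List Int) : Decidable (Spec_solution s out) := by unfold Spec_solution; infer_instance

-- ===== CLAIM (what is proved, stated in full; the proofs are below) =====
def Claim_equal_solution : Prop := ∀ (s : String), Dom_solution s → Spec_solution s (solution s)

-- ===== LEMMAS AND PROOFS =====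

-- the positions (increasing) of the occurrences of c in a char list
def occList : List Char → Char → List Nat
  | [], _ => []
  | y :: t, c => if y = c then 0 :: (occList t c).map (· + 1) else (occList t c).map (· + 1)

theorem mem_occList (l : List Char) (c : Char) : ∀ j, j ∈ occList l c ↔ l[j]? = some c := by
  induction l with
  | nil => intro j; simp [occList]
  | cons y t ih =>
    intro j
    by_cases h : y = c
    · subst h
      cases j with
      | zero => simp [occList]
      | succ k => simp [occList, List.mem_map, ih k]
    · cases j with
      | zero => simp [occList, h, List.mem_map]
      | succ k => simp [occList, h, List.mem_map, ih k]

theorem occList_append (l1 l2 : List Char) (c : Char) :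
    occList (l1 ++ l2) c = occList l1 c ++ (occList l2 c).map (· + l1.length) := by
  induction l1 with
  | nil => simp [occList]
  | cons y t ih =>
    have hmm : ((occList l2 c).map (· + t.length)).map (· + 1)
        = (occList l2 c).map (· + (t.length + 1)) := by
      rw [List.map_map]
      exact List.map_congr_left (fun x _ => by simp [Function.comp]; omega)
    by_cases h : y = c <;> simp [occList, h, ih, List.map_append, hmm]

theorem occList_append_singleton (l : List Char) (x c : Char) :
    occList (l ++ [x]) c = occList l c ++ (if x = c then [l.length] else []) := by
  rw [occList_append]
  by_cases h : x = c <;> simp [occList, h]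

theorem occList_sorted (l : List Char) (c : Char) : (occList l c).Pairwise (· < ·) := by
  induction l with
  | nil => simp [occList]
  | cons y t ih =>
    have hmap : ((occList t c).map (· + 1)).Pairwise (· < ·) :=
      List.pairwise_map.2 (ih.imp (fun h => by omega))
    by_cases h : y = c
    · simp only [occList, if_pos h]
      exact List.pairwise_cons.2 ⟨fun b hb => by
        obtain ⟨a, _, rfl⟩ := List.mem_map.1 hb; omega, hmap⟩
    · simpa only [occList, if_neg h] using hmap

theorem occList_lt (l : List Char) (c : Char) : ∀ j ∈ occList l c, j < l.length := by
  intro j hj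
  exact (List.getElem?_eq_some_iff.1 ((mem_occList l c j).1 hj)).1

-- the last occurrence of c in l (the unmatched one after A has processed l)
def lastOcc? (l : List Char) (c : Char) : Option Nat := (occList l c).getLast?

theorem lastOcc?_append_singleton (l : List Char) (x c : Char) :
    lastOcc? (l ++ [x]) c = if x = c then some l.length else lastOcc? l c := by
  unfold lastOcc?
  rw [occList_append_singleton]
  by_cases h : x = c <;> simp [h]

-- the common reference value: element for position done.length is the distance to the
-- last prior occurrence of the current letter, or -1
def expectedList : List Char → List Char → List Int
  | _, [] => []
  | done, c :: rest =>
      (match lastOcc? done c with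
       | some p => ((done.length : Int) - (p : Int))
       | none => -1) :: expectedList (done ++ [c]) rest

theorem expectedList_length (rest : List Char) :
    ∀ done, (expectedList done rest).length = rest.length := by
  induction rest with
  | nil => intro done; rfl
  | cons c r ih => intro done; simp [expectedList, ih]

theorem expectedList_getElem? (rest : List Char) :
    ∀ (done : List Char) (i : Nat) (hi : i < rest.length),
      (expectedList done rest)[i]? =
        some (match lastOcc? (done ++ rest.take i) rest[i] with
              | some p => ((done.length + i : Int) - (p : Int))
              | none => -1) := by
  induction rest with
  | nil => intro done i hi; simp at hi
  | cons c r ih =>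
    intro done i hi
    cases i with
    | zero =>
      simp only [expectedList, List.getElem?_cons_zero, List.take_zero, List.append_nil,
        List.getElem_cons_zero, Option.some.injEq]
      cases lastOcc? done c <;> simp
    | succ k =>
      have hk : k < r.length := by simpa using hi
      simp only [expectedList, List.getElem?_cons_succ]
      rw [ih (done ++ [c]) k hk]
      have harg : (done ++ [c]) ++ r.take k = done ++ (c :: r).take (k + 1) := by simp
      rw [harg]
      have hlen : ((done ++ [c]).length + k : Int) = (done.length + (k + 1) : Int) := by
        simp; omega
      rw [hlen]
      simp

-- ========== A-side: the scan-and-mark loop computes expectedList ==========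

-- positions of the occurrences of x in A's s_list
def posOf : List String → String → List Nat
  | [], _ => []
  | y :: t, x => if y = x then 0 :: (posOf t x).map (· + 1) else (posOf t x).map (· + 1)

theorem index?_eq_head?_posOf (sl : List String) (x : String) :
    PySem.List.index? sl x = (posOf sl x).head? := by
  induction sl with
  | nil => simp [posOf, PySem.List.index?_eq_idxOf?, List.idxOf?]
  | cons y t ih =>
    by_cases h : y = x
    · subst h; rw [PySem.List.index?_cons_self y t]; simp [posOf]
    · rw [PySem.List.index?_cons_of_ne t h, ih]
      simp [posOf, h, List.head?_map]

theorem posOf_append_singleton (sl : List String) (y x : String) :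
    posOf (sl ++ [y]) x = posOf sl x ++ (if y = x then [sl.length] else []) := by
  induction sl with
  | nil => by_cases h : y = x <;> simp [posOf, h]
  | cons z t ih =>
    by_cases hz : z = x <;>
      simp [posOf, hz, ih, List.map_append] <;> by_cases h : y = x <;> simp [h]

theorem singleton_ne_checked (c : Char) : String.singleton c ≠ "checked" := by
  intro h; have := congrArg String.length h
  have h2 : "checked".length = 7 := rfl
  simp [h2] at this

theorem singleton_inj {c c' : Char} (h : String.singleton c = String.singleton c') : c = c' := by
  simpa [String.singleton] using h

-- setting the first occurrence of x to "checked" pops it from posOf · x and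
-- leaves posOf · x' untouched for every other non-"checked" x'
theorem posOf_set_checked (sl : List String) (x : String) (p : Nat) (q : List Nat)
    (hpos : posOf sl x = p :: q) (x' : String) (hx' : x' ≠ "checked") :
    posOf (sl.set p "checked") x' = (if x' = x then q else posOf sl x') := by
  induction sl generalizing p q with
  | nil => simp [posOf] at hpos
  | cons y t ih =>
    by_cases hy : y = x
    · rw [hy] at hpos ⊢
      simp only [posOf] at hpos
      obtain ⟨hp, hq⟩ := List.cons.injEq .. ▸ hpos
      rw [← hp, List.set_cons_zero]
      by_cases hx : x' = x
      · rw [hx]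
        have hc : ("checked" : String) ≠ x := fun h => hx' (hx.trans h.symm)
        simp [posOf, hc, hq]
      · have h2 : x ≠ x' := fun h => hx h.symm
        simp [posOf, Ne.symm hx', hx, h2]
    · simp only [posOf, if_neg hy] at hpos
      cases hpos' : posOf t x with
      | nil => rw [hpos'] at hpos; simp at hpos
      | cons p0 q0 =>
        rw [hpos'] at hpos
        simp only [List.map_cons] at hpos
        obtain ⟨hp, hq⟩ := List.cons.injEq .. ▸ hpos
        have ihr := ih p0 q0 hpos'
        rw [← hp, List.set_cons_succ]
        by_cases hx : x' = x
        · rw [hx] at ihr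
          simp [posOf, hy, ihr, hx, ← hq]
        · simp [posOf, ihr, hx]

-- loop invariant: the unmatched occurrences in s_list of each letter are exactly
-- the last occurrence of that letter in the processed prefix
theorem loopA_eq (rest : List Char) :
    ∀ (done : List Char) (ans : List Int) (sl : List String),
      sl.length = done.length →
      (∀ c : Char, posOf sl (String.singleton c) = (lastOcc? done c).toList) →
      solutionLoopA done.length rest ans sl = ans ++ expectedList done rest := by
  induction rest with
  | nil => intro _ _ _ _ _; simp [solutionLoopA, expectedList]
  | cons c r ih =>
    intro done ans sl hlen hInv
    have hidx : PySem.List.index? sl (String.singleton c) = lastOcc? done c := by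
      rw [index?_eq_head?_posOf, hInv c]
      cases lastOcc? done c <;> rfl
    cases hd : lastOcc? done c with
    | none =>
      rw [hd] at hidx
      rw [solutionLoopA, hidx]
      have hInv' : ∀ c', posOf (sl ++ [String.singleton c]) (String.singleton c')
          = (lastOcc? (done ++ [c]) c').toList := by
        intro c'
        rw [posOf_append_singleton, lastOcc?_append_singleton]
        by_cases hc : c = c'
        · subst hc
          rw [hInv c, hd]
          simp [hlen]
        · have hne : String.singleton c ≠ String.singleton c' := fun h => hc (singleton_inj h)
          simp [hne, hInv c', hc]
      have hrec := ih (done ++ [c]) (ans ++ [-1]) (sl ++ [String.singleton c])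
        (by simp [hlen]) hInv'
      rw [show done.length + 1 = (done ++ [c]).length by simp] at *
      rw [hrec]
      simp [expectedList, hd]
    | some p =>
      rw [hd] at hidx
      rw [solutionLoopA, hidx]
      have hpos : posOf sl (String.singleton c) = [p] := by rw [hInv c, hd]; rfl
      have hInv' : ∀ c', posOf ((sl.set p "checked") ++ [String.singleton c]) (String.singleton c')
          = (lastOcc? (done ++ [c]) c').toList := by
        intro c'
        rw [posOf_append_singleton,
          posOf_set_checked sl (String.singleton c) p [] hpos _ (singleton_ne_checked c'),
          lastOcc?_append_singleton]
        by_cases hc : c = c'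
        · subst hc
          simp [List.length_set, hlen]
        · have hne : String.singleton c ≠ String.singleton c' := fun h => hc (singleton_inj h)
          have hne' : String.singleton c' ≠ String.singleton c := fun h => hc (singleton_inj h).symm
          simp [hne, hne', hInv c', hc]
      have hrec := ih (done ++ [c]) (ans ++ [(done.length : Int) - (p : Int)])
        ((sl.set p "checked") ++ [String.singleton c])
        (by simp [List.length_set, hlen]) hInv'
      rw [show done.length + 1 = (done ++ [c]).length by simp] at *
      show solutionLoopA (done ++ [c]).length r (ans ++ [(done.length : Int) - (p : Int)])
          ((sl.set p "checked") ++ [String.singleton c]) = ans ++ expectedList done (c :: r)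
      rw [hrec]
      simp [expectedList, hd]

-- ========== B-side ==========

-- the grouping pass builds exactly the occurrence lists
theorem buildPos_getD (rest : List Char) :
    ∀ (done : List Char) (d : PySem.Dict Char (List Nat)),
      (∀ c, d.getD c [] = occList done c) →
      ∀ c, (buildPos done.length rest d).getD c [] = occList (done ++ rest) c := by
  induction rest with
  | nil => intro done d hInv c; simpa using hInv c
  | cons x r ih =>
    intro done d hInv c
    have hInv' : ∀ c', (d.modify x [] (fun l => l ++ [done.length])).getD c' []
        = occList (done ++ [x]) c' := by
      intro c'
      rw [PySem.Dict.getD_modify, occList_append_singleton, hInv x]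
      by_cases hc : c' = x
      · subst hc; simp
      · simp [hc, Ne.symm hc, hInv c']
    have hrec := ih (done ++ [x]) _ hInv' c
    rw [buildPos]
    rw [show done.length + 1 = (done ++ [x]).length by simp]
    simpa using hrec

theorem buildPos_keys (rest : List Char) :
    ∀ (done : List Char) (d : PySem.Dict Char (List Nat)),
      d.keys.Nodup → (∀ c, c ∈ d.keys ↔ occList done c ≠ []) →
      (buildPos done.length rest d).keys.Nodup ∧
        (∀ c, c ∈ (buildPos done.length rest d).keys ↔ occList (done ++ rest) c ≠ []) := by
  induction rest with
  | nil =>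
    intro done d hnd hmem
    exact ⟨hnd, fun c => by simpa using hmem c⟩
  | cons x r ih =>
    intro done d hnd hmem
    have hkeys : ∀ (d' : PySem.Dict Char (List Nat)), d'.keys.Nodup →
        (∀ c, c ∈ d'.keys ↔ occList done c ≠ []) →
        (d'.modify x [] (fun l => l ++ [done.length])).keys.Nodup ∧
          (∀ c, c ∈ (d'.modify x [] (fun l => l ++ [done.length])).keys ↔
            occList (done ++ [x]) c ≠ []) := by
      intro d' hnd' hmem'
      rw [PySem.Dict.keys_modify]
      by_cases hx : d'.contains x
      · rw [PySem.Dict.keys_insert_of_contains _ _ hx]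
        refine ⟨hnd', fun c => ?_⟩
        rw [hmem' c, occList_append_singleton]
        by_cases hc : x = c
        · subst hc
          have : occList done x ≠ [] := (hmem' x).1 ((PySem.Dict.contains_iff_mem_keys _ _).1 hx)
          simp [this]
        · simp [hc]
      · have hx' : d'.contains x = false := by simpa using hx
        rw [PySem.Dict.keys_insert_of_not_contains _ _ hx']
        have hxm : x ∉ d'.keys := fun h => hx ((PySem.Dict.contains_iff_mem_keys _ _).2 h)
        refine ⟨?_, fun c => ?_⟩
        · have hdisj : List.Disjoint d'.keys [x] := by
            intro a ha hb
            rw [List.mem_singleton] at hb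
            exact hxm (hb ▸ ha)
          simp only [List.nodup_append, hnd', true_and]
          refine ⟨by simp, ?_⟩
          intro a ha b hb
          rw [List.mem_singleton] at hb
          subst hb
          intro h
          rw [h] at ha
          exact hxm ha
        rw [occList_append_singleton]
        by_cases hc : x = c
        · subst hc; simp
        · simp [hc, hmem' c, Ne.symm hc]
    obtain ⟨h1, h2⟩ := hkeys d hnd hmem
    have hrec := ih (done ++ [x]) _ h1 h2
    rw [buildPos]
    rw [show done.length + 1 = (done ++ [x]).length by simp]
    exact ⟨hrec.1, fun c => by simpa using hrec.2 c⟩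

-- the previous element of i in a position list (the source of the write at i)
def pairPred : List Nat → Nat → Option Nat
  | p :: q :: t, i => if q = i then some p else pairPred (q :: t) i
  | _, _ => none

theorem pairPred_none (i : Nat) : ∀ ps : List Nat, (∀ x ∈ ps.tail, x ≠ i) → pairPred ps i = none := by
  intro ps
  induction ps with
  | nil => intro _; rfl
  | cons p t ih =>
    intro h
    cases t with
    | nil => rfl
    | cons q t' =>
      have hq : q ≠ i := h q (by simp)
      simp only [pairPred, if_neg hq]
      exact ih (fun x hx => h x (List.mem_cons_of_mem q hx))

theorem scatter_untouched (i : Nat) :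
    ∀ (ps : List Nat) (a : List Int), (∀ x ∈ ps.tail, x ≠ i) →
      ((ps.zip ps.tail).foldl (fun a pq => a.set pq.2 ((pq.2 : Int) - (pq.1 : Int))) a)[i]? = a[i]? := by
  intro ps
  induction ps with
  | nil => intro a _; rfl
  | cons p t ih =>
    intro a h
    cases t with
    | nil => rfl
    | cons q t' =>
      have hq : q ≠ i := h q (by simp)
      show (((q :: t').zip t').foldl (fun a pq => a.set pq.2 ((pq.2 : Int) - (pq.1 : Int)))
        (a.set q ((q : Int) - (p : Int))))[i]? = a[i]?
      have ih' := ih (a.set q ((q : Int) - (p : Int))) (fun x hx => h x (List.mem_cons_of_mem q hx))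
      simp only [List.tail_cons] at ih'
      rw [ih']
      exact List.getElem?_set_ne hq

theorem scatter_length :
    ∀ (L : List (Nat × Nat)) (a : List Int),
      (L.foldl (fun a pq => a.set pq.2 ((pq.2 : Int) - (pq.1 : Int))) a).length = a.length := by
  intro L
  induction L with
  | nil => intro a; rfl
  | cons pq L ih => intro a; simp [List.foldl_cons, ih]

theorem scatterOne_getElem? (i : Nat) :
    ∀ (ps : List Nat), ps.Pairwise (· < ·) →
      ∀ (a : List Int), (∀ x ∈ ps, x < a.length) →
      (scatterOne a ps)[i]? =
        match pairPred ps i with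
        | some p => some ((i : Int) - (p : Int))
        | none => a[i]? := by
  intro ps
  induction ps with
  | nil => intro _ a _; rfl
  | cons p t ih =>
    intro hs a ha
    cases t with
    | nil => rfl
    | cons q t' =>
      simp only [scatterOne, PySem.List.slice_from_one]
      by_cases hqi : q = i
      · subst hqi
        simp only [pairPred]
        have huntouched := scatter_untouched q (q :: t')
          (a.set q ((q : Int) - (p : Int))) (fun x hx => by
            have := (List.pairwise_cons.1 (List.pairwise_cons.1 hs).2).1 x hx
            omega)
        simp only [List.tail_cons] at huntouched
        show (((q :: t').zip t').foldl (fun a pq => a.set pq.2 ((pq.2 : Int) - (pq.1 : Int)))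
          (a.set q ((q : Int) - (p : Int))))[q]? = some ((q : Int) - (p : Int))
        rw [huntouched]
        exact List.getElem?_set_self (ha q (by simp))
      · simp only [pairPred, if_neg hqi]
        have ih' := ih (List.pairwise_cons.1 hs).2 (a.set q ((q : Int) - (p : Int)))
          (fun x hx => by rw [List.length_set]; exact ha x (List.mem_cons_of_mem p hx))
        simp only [scatterOne, PySem.List.slice_from_one, List.tail_cons] at ih'
        show (((q :: t').zip t').foldl (fun a pq => a.set pq.2 ((pq.2 : Int) - (pq.1 : Int)))
          (a.set q ((q : Int) - (p : Int))))[i]? = _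
        rw [ih']
        cases pairPred (q :: t') i with
        | some p' => rfl
        | none => exact List.getElem?_set_ne hqi

theorem scatterOne_length (a : List Int) (ps : List Nat) : (scatterOne a ps).length = a.length := by
  unfold scatterOne
  exact scatter_length _ a

theorem pairPred_decomp (i : Nat) (B : List Nat) (hB : ∀ x ∈ B, i < x) :
    ∀ A : List Nat, (∀ x ∈ A, x < i) → pairPred (A ++ i :: B) i = A.getLast? := by
  intro A
  induction A with
  | nil =>
    intro _
    cases B with
    | nil => rfl
    | cons b t =>
      have hb : b ≠ i := by have := hB b (by simp); omega
      simp only [List.nil_append, pairPred, if_neg hb]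
      exact pairPred_none i (b :: t)
        (fun x hx => by have := hB x (List.mem_cons_of_mem b hx); omega)
  | cons x A' ihA =>
    intro hA
    cases A' with
    | nil => simp [pairPred]
    | cons y A'' =>
      have hy : y ≠ i := by have := hA y (by simp); omega
      simp only [List.cons_append, pairPred, if_neg hy]
      rw [← List.cons_append, ihA (fun z hz => hA z (List.mem_cons_of_mem x hz))]
      rw [List.getLast?_cons_cons]

-- for the letter at position i, the write source is the last prior occurrence
theorem pairPred_occ (cs : List Char) (i : Nat) (c : Char) (h : cs[i]? = some c) :
    pairPred (occList cs c) i = lastOcc? (cs.take i) c := by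
  obtain ⟨hlt, hgec⟩ := List.getElem?_eq_some_iff.1 h
  have hl : (cs.take i).length = i := by simp [List.length_take, Nat.min_eq_left hlt.le]
  have hdecomp : occList cs c = occList (cs.take i) c
      ++ i :: (((occList (cs.drop (i + 1)) c).map (· + 1)).map (· + i)) := by
    conv_lhs => rw [← List.take_append_drop i cs]
    rw [List.drop_eq_getElem_cons hlt, hgec, occList_append, hl]
    simp [occList, List.map_map]
  rw [hdecomp, pairPred_decomp i _ ?hB (occList (cs.take i) c) ?hA]
  · rfl
  case hB =>
    intro x hx
    simp only [List.mem_map] at hx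
    obtain ⟨y, ⟨z, _, rfl⟩, rfl⟩ := hx
    omega
  case hA =>
    intro x hx
    have := occList_lt (cs.take i) c x hx
    omega

theorem pairPred_occ_ne (cs : List Char) (i : Nat) (c : Char) (h : cs[i]? ≠ some c) :
    pairPred (occList cs c) i = none := by
  apply pairPred_none
  intro x hx hxi
  subst hxi
  exact h ((mem_occList cs c x).1 (List.mem_of_mem_tail hx))

-- folding the scatter over the occurrence lists of distinct letters
theorem foldK (cs : List Char) :
    ∀ (K : List Char), K.Nodup → ∀ (a : List Int), a.length = cs.length → ∀ i,
      ((K.map (fun c => occList cs c)).foldl scatterOne a)[i]? =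
        match cs[i]? with
        | some c =>
            if c ∈ K then
              (match lastOcc? (cs.take i) c with
               | some p => some ((i : Int) - (p : Int))
               | none => a[i]?)
            else a[i]?
        | none => a[i]? := by
  intro K
  induction K with
  | nil => intro _ a _ i; cases cs[i]? <;> simp
  | cons c0 K' ih =>
    intro hnd a hlen i
    have hnd' := (List.nodup_cons.1 hnd).2
    have hc0 : c0 ∉ K' := (List.nodup_cons.1 hnd).1
    have hstep := scatterOne_getElem? i (occList cs c0) (occList_sorted cs c0) a
      (fun x hx => hlen ▸ occList_lt cs c0 x hx)
    have hlen' : (scatterOne a (occList cs c0)).length = cs.length := by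
      rw [scatterOne_length, hlen]
    have ihr := ih hnd' (scatterOne a (occList cs c0)) hlen' i
    simp only [List.map_cons, List.foldl_cons]
    rw [ihr]
    cases hci : cs[i]? with
    | none =>
      rw [hstep, pairPred_occ_ne cs i c0 (by rw [hci]; simp)]
    | some ci =>
      by_cases hcc : ci = c0
      · subst hcc
        have hres : (scatterOne a (occList cs ci))[i]? =
            match lastOcc? (cs.take i) ci with
            | some p => some ((i : Int) - (p : Int))
            | none => a[i]? := by
          rw [hstep, pairPred_occ cs i ci hci]
        simp only [hres, hc0, if_false, List.mem_cons_self, if_true]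
      · have ha' : (scatterOne a (occList cs c0))[i]? = a[i]? := by
          rw [hstep, pairPred_occ_ne cs i c0 (by rw [hci]; simp [hcc])]
        simp only [ha', List.mem_cons, hcc, false_or]

theorem solution_alt_eq (s : String) : solution_alt s = expectedList [] s.toList := by
  unfold solution_alt
  show (buildPos 0 s.toList PySem.Dict.empty).values.foldl scatterOne
      (List.replicate s.toList.length (-1)) = expectedList [] s.toList
  have hg := buildPos_getD s.toList [] PySem.Dict.empty
    (fun c => by simp [PySem.Dict.getD_empty, occList])
  have hk := buildPos_keys s.toList [] PySem.Dict.empty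
    (by simp [PySem.Dict.keys_empty]) (fun c => by simp [PySem.Dict.keys_empty, occList])
  simp only [List.length_nil, List.nil_append] at hg hk
  obtain ⟨hnd, hmem⟩ := hk
  rw [PySem.Dict.values_eq_map_keys _ hnd []]
  rw [List.map_congr_left (fun c _ => hg c)]
  apply List.ext_getElem?
  intro i
  rw [foldK s.toList _ hnd _ (by simp) i]
  by_cases hi : i < s.toList.length
  · have hci : s.toList[i]? = some s.toList[i] := List.getElem?_eq_getElem hi
    rw [hci]
    have hocc : s.toList[i] ∈ (buildPos 0 s.toList PySem.Dict.empty).keys := by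
      rw [hmem s.toList[i]]
      intro hemp
      have : i ∈ occList s.toList s.toList[i] := (mem_occList _ _ i).2 hci
      rw [hemp] at this
      exact absurd this (List.not_mem_nil)
    show (if s.toList[i] ∈ (buildPos 0 s.toList PySem.Dict.empty).keys then
        match lastOcc? (List.take i s.toList) s.toList[i] with
        | some p => some ((i : Int) - (p : Int))
        | none => (List.replicate s.toList.length (-1))[i]?
      else (List.replicate s.toList.length (-1))[i]?) = (expectedList [] s.toList)[i]?
    rw [if_pos hocc, expectedList_getElem? s.toList [] i hi]
    simp only [List.nil_append, List.length_nil, Nat.cast_zero, zero_add]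
    rw [List.getElem?_replicate, if_pos hi]
    cases lastOcc? (List.take i s.toList) s.toList[i] <;> rfl
  · have h1 : s.toList[i]? = none := List.getElem?_eq_none (by omega)
    rw [h1]
    have h2 : (expectedList [] s.toList)[i]? = none :=
      List.getElem?_eq_none (by rw [expectedList_length]; omega)
    rw [h2, List.getElem?_replicate, if_neg hi]

-- ===== VERDICT (by name: the statement is the Claim_ definition above) =====
theorem solution_spec : Claim_equal_solution := by
  intro s _
  show solution s = solution_alt s
  rw [solution_alt_eq]
  have := loopA_eq s.toList [] [] [] rfl
    (fun c => by simp [posOf, lastOcc?, occList])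
  simpa using this
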